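-- pv_equiv track=rewrite | github.com/openxjarvis/clawdbot-python | openclaw/agents/context_pruning/pruner.py | _take_head_from_joined_text
-- ===== SOURCE A (Python) =====
-- def _take_head_from_joined_text(parts: list[str], max_chars: int) -> str:
--     """Take first max_chars from joined text parts."""
--     if max_chars <= 0 or not parts:
--         return ""
--
--     remaining = max_chars
--     out = ""
--
--     for i, p in enumerate(parts):
--         if remaining <= 0:
--             break
--
--         if i > 0:
--             out += "\n"
--             remaining -= 1
--             if remaining <= 0:
--                 break
--
--         if len(p) <= remaining:
--             out += p
--             remaining -= len(p)
--         else: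
--             out += p[:remaining]
--             remaining = 0
--
--     return out
-- ===== SOURCE B (Python) =====
-- def _take_head_from_joined_text(parts: list[str], max_chars: int) -> str:
--     """Take first max_chars from joined text parts."""
--     if max_chars <= 0:
--         return ""
--     return "\n".join(parts)[:max_chars]
-- ===== Notes on version B (the rewrite author's own statement) =====
-- stated objective: simpler
-- what changed: Replaces A's per-part character-budget loop with early termination by a single join followed by one slice (guarding max_chars <= 0 since negative slice bounds differ).
import Mathlib
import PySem

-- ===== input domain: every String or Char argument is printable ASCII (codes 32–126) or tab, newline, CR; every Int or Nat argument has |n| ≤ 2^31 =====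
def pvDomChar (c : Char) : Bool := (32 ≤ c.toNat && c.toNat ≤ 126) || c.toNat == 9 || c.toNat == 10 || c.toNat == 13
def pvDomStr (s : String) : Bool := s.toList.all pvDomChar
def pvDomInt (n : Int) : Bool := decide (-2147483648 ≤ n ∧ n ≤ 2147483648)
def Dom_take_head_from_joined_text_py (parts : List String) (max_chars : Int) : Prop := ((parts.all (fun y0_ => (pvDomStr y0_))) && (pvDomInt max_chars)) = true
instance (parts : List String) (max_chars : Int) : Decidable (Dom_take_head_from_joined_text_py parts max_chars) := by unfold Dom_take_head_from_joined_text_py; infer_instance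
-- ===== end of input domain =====

-- B replaces A's per-part character-budget loop (with early break) by one join followed by one slice; objective: simpler.

-- ===== PORT A =====
-- the 'for i, p in enumerate(parts)' loop of A, with its two 'break's as early returns
def pvALoopTHJ (ps : List String) (i : Nat) (remaining : Int) (out : String) : String :=
  match ps with
  | [] => out
  | p :: rest =>
    if remaining ≤ 0 then out
    else
      let out1 := if 0 < i then out ++ "\n" else out
      let rem1 := if 0 < i then remaining - 1 else remaining
      if 0 < i ∧ rem1 ≤ 0 then out1
      else if PySem.Str.len p ≤ rem1 then
        pvALoopTHJ rest (i + 1) (rem1 - PySem.Str.len p) (out1 ++ p)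
      else
        pvALoopTHJ rest (i + 1) 0 (out1 ++ PySem.Str.slice p none (some rem1))

def take_head_from_joined_text_py (parts : List String) (max_chars : Int) : String :=
  if max_chars ≤ 0 ∨ parts = [] then ""
  else pvALoopTHJ parts 0 max_chars ""

-- ===== PORT B =====
def take_head_from_joined_text_py_alt (parts : List String) (max_chars : Int) : String :=
  if max_chars ≤ 0 then ""
  else PySem.Str.slice (PySem.Str.join "\n" parts) none (some max_chars)

-- ===== PRECONDITION & SPEC =====
def Spec_take_head_from_joined_text_py (parts : List String) (max_chars : Int) (out : String) : Prop := out = take_head_from_joined_text_py_alt parts max_chars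
instance (parts : List String) (max_chars : Int) (out : String) : Decidable (Spec_take_head_from_joined_text_py parts max_chars out) := by unfold Spec_take_head_from_joined_text_py; infer_instance

-- ===== CLAIM (what is proved, stated in full; the proofs are below) =====
def Claim_equal_take_head_from_joined_text_py : Prop := ∀ (parts : List String) (max_chars : Int), Dom_take_head_from_joined_text_py parts max_chars → Spec_take_head_from_joined_text_py parts max_chars (take_head_from_joined_text_py parts max_chars)

-- ===== LEMMAS AND PROOFS =====

-- "\n" ++ p1 ++ "\n" ++ p2 ++ … : what the loop appends from part index ≥ 1 on
def pvPrejoin (ps : List String) : List Char := ps.flatMap (fun p => '\n' :: p.toList)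

theorem pvPrejoin_cons (p : String) (rest : List String) :
    pvPrejoin (p :: rest) = '\n' :: (p.toList ++ pvPrejoin rest) := by
  simp [pvPrejoin]

theorem pvJoin_chars (p : String) (rest : List String) :
    PySem.Chars.join ['\n'] (p.toList :: rest.map String.toList) = p.toList ++ pvPrejoin rest := by
  induction rest generalizing p with
  | nil => simp [pvPrejoin, PySem.Chars.join_singleton]
  | cons q rest ih =>
    simp only [List.map_cons]
    rw [PySem.Chars.join_cons_cons, ih q, pvPrejoin_cons]
    simp

theorem pvALoop_nonpos (ps : List String) (i : Nat) (rem : Int) (h : rem ≤ 0) (out : String) :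
    pvALoopTHJ ps i rem out = out := by
  cases ps <;> simp [pvALoopTHJ, h]

theorem pvALoop_pos (ps : List String) : ∀ (i : Nat), 0 < i → ∀ (rem : Int) (out : String),
    (pvALoopTHJ ps i rem out).toList = out.toList ++ (pvPrejoin ps).take rem.toNat := by
  induction ps with
  | nil => intro i hi rem out; simp [pvALoopTHJ, pvPrejoin]
  | cons p rest ih =>
    intro i hi rem out
    rw [pvALoopTHJ]
    have hlen : PySem.Str.len p = (p.toList.length : Int) := by
      simp [PySem.Str.len]
    by_cases h0 : rem ≤ 0
    · have : rem.toNat = 0 := by omega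
      simp [h0, this]
    · simp only [h0, if_false, hi, if_true, pvPrejoin_cons]
      by_cases h1 : rem - 1 ≤ 0
      · have hr1 : rem = 1 := by omega
        simp [hr1]
      · have hrem : rem.toNat = (rem - 1).toNat + 1 := by omega
        simp only [true_and, h1, if_false]
        by_cases h2 : PySem.Str.len p ≤ rem - 1
        · rw [if_pos h2, ih (i + 1) (by omega)]
          rw [hlen] at h2
          have hge : p.toList.length ≤ (rem - 1).toNat := by omega
          have h3 : (rem - 1 - PySem.Str.len p).toNat = (rem - 1).toNat - p.toList.length := by
            rw [hlen]; omega
          rw [hrem, List.take_succ_cons, List.take_append]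
          have hL : p.toList.length = p.length := by simp
          simp
          omega
        · rw [if_neg h2, pvALoop_nonpos rest (i + 1) 0 le_rfl]
          rw [hlen] at h2
          rw [hrem, List.take_succ_cons, List.take_append]
          have hz : (rem - 1).toNat - p.toList.length = 0 := by omega
          have hL : p.toList.length = p.length := by simp
          simp [PySem.Str.toList_slice, PySem.Chars.slice_eq_listSlice,
            PySem.List.slice_to _ (by omega : (0:Int) ≤ rem - 1)]
          exact Or.inl (by omega)

theorem pvALoop_zero (p : String) (rest : List String) (rem : Int) (h : 0 < rem) (out : String) :
    (pvALoopTHJ (p :: rest) 0 rem out).toList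
      = out.toList ++ (p.toList ++ pvPrejoin rest).take rem.toNat := by
  rw [pvALoopTHJ]
  have h0 : ¬ rem ≤ 0 := by omega
  have hlen : PySem.Str.len p = (p.toList.length : Int) := by
    simp [PySem.Str.len]
  simp only [h0, if_false, Nat.lt_irrefl, false_and, if_false]
  by_cases h2 : PySem.Str.len p ≤ rem
  · rw [if_pos h2, pvALoop_pos rest 1 (by omega)]
    rw [hlen] at h2
    have hge : p.toList.length ≤ rem.toNat := by omega
    have h3 : (rem - PySem.Str.len p).toNat = rem.toNat - p.toList.length := by
      rw [hlen]; omega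
    rw [List.take_append]
    simp [List.take_of_length_le hge]
  · rw [if_neg h2, pvALoop_nonpos rest 1 0 le_rfl]
    rw [hlen] at h2
    rw [List.take_append]
    have hz : rem.toNat - p.toList.length = 0 := by omega
    have hL : p.toList.length = p.length := by simp
    simp [PySem.Str.toList_slice, PySem.Chars.slice_eq_listSlice,
      PySem.List.slice_to _ (by omega : (0:Int) ≤ rem)]
    exact Or.inl (by omega)

-- ===== VERDICT (by name: the statement is the Claim_ definition above) =====
theorem take_head_from_joined_text_py_spec : Claim_equal_take_head_from_joined_text_py := by
  intro parts max_chars _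
  unfold Spec_take_head_from_joined_text_py take_head_from_joined_text_py
    take_head_from_joined_text_py_alt
  by_cases hm : max_chars ≤ 0
  · simp [hm]
  · cases parts with
    | nil =>
      simp only [hm, or_true, if_true]
      apply String.toList_injective
      simp [PySem.Str.toList_slice, PySem.Chars.slice_eq_listSlice,
        PySem.List.slice_to _ (by omega : (0:Int) ≤ max_chars),
        PySem.Str.toList_join, PySem.Chars.join_nil]
    | cons p rest =>
      simp only [hm, false_or, reduceCtorEq, if_false]
      apply String.toList_injective
      rw [pvALoop_zero p rest max_chars (by omega)]
      simp [PySem.Str.toList_slice, PySem.Chars.slice_eq_listSlice,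
        PySem.List.slice_to _ (by omega : (0:Int) ≤ max_chars),
        PySem.Str.toList_join, pvJoin_chars]
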